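-- pv_equiv track=rewrite | github.com/rumman52/Shuddho | services/normalizer/shuddho_normalizer/normalizer.py | _trim_edges
-- ===== SOURCE A (Python) =====
-- def _trim_edges(items: list[tuple[str, int]]) -> tuple[str, list[int]]:
--     start = 0
--     end = len(items)
--     while start < end and items[start][0].isspace():
--         start += 1
--     while end > start and items[end - 1][0].isspace():
--         end -= 1
--     trimmed = items[start:end]
--     return "".join(character for character, _ in trimmed), [index for _, index in trimmed]
-- ===== SOURCE B (Python) =====
-- def _trim_edges(items: list[tuple[str, int]]) -> tuple[str, list[int]]:
--     keep = [i for i, (unit, _) in enumerate(items) if not unit.isspace()]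
--     if not keep:
--         return "", []
--     trimmed = items[keep[0]: keep[-1] + 1]
--     return "".join(unit for unit, _ in trimmed), [index for _, index in trimmed]
-- ===== Notes on version B (the rewrite author's own statement) =====
-- stated objective: alternative
-- what changed: Replaces the two early-stopping edge while-loops over indices with a single enumerate pass that collects all non-whitespace positions, then slices between the first and last collected position.
import Mathlib
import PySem

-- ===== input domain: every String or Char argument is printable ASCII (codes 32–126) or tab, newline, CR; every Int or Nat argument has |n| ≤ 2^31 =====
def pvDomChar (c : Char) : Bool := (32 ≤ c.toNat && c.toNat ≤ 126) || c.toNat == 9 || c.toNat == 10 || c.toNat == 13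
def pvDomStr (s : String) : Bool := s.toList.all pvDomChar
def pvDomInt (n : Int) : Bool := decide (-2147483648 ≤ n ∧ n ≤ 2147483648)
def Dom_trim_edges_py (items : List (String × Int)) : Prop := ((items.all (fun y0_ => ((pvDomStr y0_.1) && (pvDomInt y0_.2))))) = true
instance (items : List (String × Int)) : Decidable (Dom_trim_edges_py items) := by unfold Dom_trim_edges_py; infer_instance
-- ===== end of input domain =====

-- B replaces A's two early-stopping edge while-loops by one full enumerate pass collecting
-- the non-whitespace positions, then slices from the first to the last collected position
-- (objective: alternative decomposition, same cost).

-- ===== PORT A =====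
-- while start < end and items[start][0].isspace(): start += 1
-- items[start] accessed via getD: exact here because the guard gives start < end ≤ len(items)
def pvAStart (items : List (String × Int)) (start stop : Nat) : Nat :=
  if start < stop && PySem.Str.strIsspace (items.getD start ("", 0)).1 then
    pvAStart items (start + 1) stop
  else start
termination_by stop - start
decreasing_by simp_all; omega

-- while end > start and items[end - 1][0].isspace(): end -= 1
-- items[end-1] accessed via getD: exact because the guard gives start < end ≤ len(items)
def pvAEnd (items : List (String × Int)) (start stop : Nat) : Nat :=
  if start < stop && PySem.Str.strIsspace (items.getD (stop - 1) ("", 0)).1 then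
    pvAEnd items start (stop - 1)
  else stop
termination_by stop
decreasing_by simp_all; omega

def trim_edges_py (items : List (String × Int)) : String × List Int :=
  let start := pvAStart items 0 items.length
  let stop := pvAEnd items start items.length
  let trimmed := PySem.List.slice items (some (start : Int)) (some (stop : Int))
  (PySem.Str.join "" (trimmed.map (·.1)), trimmed.map (·.2))

-- ===== PORT B =====
def trim_edges_py_alt (items : List (String × Int)) : String × List Int :=
  let keep := ((PySem.List.enumerate items 0).filter
    (fun p => !PySem.Str.strIsspace p.2.1)).map (·.1)
  match keep with
  | [] => ("", [])
  | i :: _ =>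
    -- keep[-1]: getLastD exact here because keep is non-empty in this branch
    let last := keep.getLastD 0
    let trimmed := PySem.List.slice items (some i) (some (last + 1))
    (PySem.Str.join "" (trimmed.map (·.1)), trimmed.map (·.2))

-- ===== PRECONDITION & SPEC =====
def Spec_trim_edges_py (items : List (String × Int)) (out : String × List Int) : Prop := out = trim_edges_py_alt items
instance (items : List (String × Int)) (out : String × List Int) : Decidable (Spec_trim_edges_py items out) := by unfold Spec_trim_edges_py; infer_instance

-- ===== CLAIM (what is proved, stated in full; the proofs are below) =====
def Claim_equal_trim_edges_py : Prop := ∀ (items : List (String × Int)), Dom_trim_edges_py items → Spec_trim_edges_py items (trim_edges_py items)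

-- ===== LEMMAS AND PROOFS =====

def pvSp (p : String × Int) : Bool := PySem.Str.strIsspace p.1

theorem takeWhile_append_left {α : Type} (p : α → Bool) (l₁ l₂ : List α)
    (h : ∃ a ∈ l₁, p a = false) :
    (l₁ ++ l₂).takeWhile p = l₁.takeWhile p := by
  induction l₁ with
  | nil => simp at h
  | cons x xs ih =>
    simp only [List.cons_append, List.takeWhile_cons]
    cases hx : p x with
    | false => simp
    | true =>
      obtain ⟨a, ha, hpa⟩ := h
      rw [List.mem_cons] at ha
      rcases ha with ha | ha
      · subst ha; simp [hx] at hpa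
      · simp only [hx, if_pos, List.takeWhile_cons_of_pos]
        rw [ih ⟨a, ha, hpa⟩]

def pvKeep (l : List (String × Int)) (s : Int) : List Int :=
  ((PySem.List.enumerate l s).filter (fun p => !pvSp p.2)).map (·.1)

theorem keep_nil_iff (l : List (String × Int)) (s : Int) :
    pvKeep l s = [] ↔ ∀ x ∈ l, pvSp x = true := by
  induction l generalizing s with
  | nil => simp [pvKeep, PySem.List.enumerate]
  | cons x xs ih =>
    simp only [pvKeep, PySem.List.enumerate_cons, List.filter_cons]
    cases hx : pvSp x with
    | false => simp [hx]
    | true =>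
      simp only [hx, Bool.not_true]
      rw [if_neg (by simp)]
      constructor
      · intro hh xy hxy
        rw [List.mem_cons] at hxy
        rcases hxy with h1 | h1
        · subst h1; exact hx
        · exact ((ih (s+1)).1 hh) xy h1
      · intro hh
        exact (ih (s+1)).2 (fun y hy => hh y (List.mem_cons_of_mem _ hy))

theorem keep_head (l : List (String × Int)) (s : Int) (i : Int) (rest : List Int)
    (h : pvKeep l s = i :: rest) :
    i = s + ((l.takeWhile pvSp).length : Int) := by
  induction l generalizing s i rest with
  | nil => simp [pvKeep, PySem.List.enumerate] at h
  | cons x xs ih =>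
    simp only [pvKeep, PySem.List.enumerate_cons, List.filter_cons] at h
    cases hx : pvSp x with
    | false =>
      simp [hx] at h
      simp [List.takeWhile_cons, hx, h.1.symm]
    | true =>
      simp only [hx, Bool.not_true, if_neg] at h
      have := ih (s+1) i rest (by simpa [pvKeep] using h)
      simp [List.takeWhile_cons, hx, this]
      push_cast
      ring

theorem keep_append (l₁ l₂ : List (String × Int)) (s : Int) :
    pvKeep (l₁ ++ l₂) s = pvKeep l₁ s ++ pvKeep l₂ (s + l₁.length) := by
  simp [pvKeep, PySem.List.enumerate_append, List.filter_append]

theorem keep_last (l : List (String × Int)) (s : Int) (d : Int)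
    (hne : ∃ x ∈ l, pvSp x = false) :
    (pvKeep l s).getLastD d
      = s + ((l.length - 1 - (l.reverse.takeWhile pvSp).length : Nat) : Int) := by
  induction l using List.reverseRecOn generalizing s with
  | nil => simp at hne
  | append_singleton ys x ih =>
    rw [keep_append]
    cases hx : pvSp x with
    | false =>
      have h1 : pvKeep [x] (s + ↑ys.length) = [s + ↑ys.length] := by
        simp [pvKeep, PySem.List.enumerate_cons, PySem.List.enumerate_nil, hx]
      rw [h1]
      simp [List.takeWhile_cons, hx]
    | true =>
      have h1 : pvKeep [x] (s + ↑ys.length) = [] := by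
        simp [pvKeep, PySem.List.enumerate_cons, PySem.List.enumerate_nil, hx]
      rw [h1, List.append_nil]
      have hys : ∃ y ∈ ys, pvSp y = false := by
        obtain ⟨a, ha, hpa⟩ := hne
        rw [List.mem_append] at ha
        rcases ha with ha | ha
        · exact ⟨a, ha, hpa⟩
        · simp at ha; subst ha; rw [hx] at hpa; cases hpa
      rw [ih s hys]
      have hlt : (ys.reverse.takeWhile pvSp).length < ys.length := by
        obtain ⟨a, ha, hpa⟩ := hys
        by_contra hge
        push_neg at hge
        have hle : (ys.reverse.takeWhile pvSp).length ≤ ys.length := by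
          have := (List.takeWhile_prefix (l := ys.reverse) pvSp).length_le
          simpa using this
        have heq : ys.reverse.takeWhile pvSp = ys.reverse :=
          (List.takeWhile_prefix pvSp).eq_of_length (by simp at hle ⊢; omega)
        have := (List.takeWhile_eq_self_iff).mp heq a (by simpa using ha)
        rw [hpa] at this; cases this
      congr 1
      simp [List.takeWhile_cons, hx]
      omega

theorem startLoop_eq (items : List (String × Int)) (s : Nat)
    (hs : s ≤ items.length) :
    pvAStart items s items.length = s + ((items.drop s).takeWhile pvSp).length := by
  revert hs
  induction s using pvAStart.induct (items := items) (stop := items.length) with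
  | case1 s hcond ih =>
    intro hs
    rw [pvAStart, if_pos hcond]
    simp only [Bool.and_eq_true, decide_eq_true_eq] at hcond
    obtain ⟨hlt, hsp⟩ := hcond
    rw [ih (by omega)]
    have hget : items.getD s ("", 0) = items[s]'hlt := by
      rw [List.getD_eq_getElem?_getD, List.getElem?_eq_getElem hlt]; rfl
    rw [List.drop_eq_getElem_cons hlt, List.takeWhile_cons_of_pos (by simp only [pvSp]; rw [← hget]; exact hsp)]
    simp; omega
  | case2 s hcond =>
    intro hs
    rw [pvAStart, if_neg hcond]
    simp only [Bool.and_eq_true, decide_eq_true_eq, not_and] at hcond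
    by_cases hlt : s < items.length
    · have hsp := hcond hlt
      simp only [Bool.not_eq_true] at hsp
      have hget : items.getD s ("", 0) = items[s]'hlt := by
        rw [List.getD_eq_getElem?_getD, List.getElem?_eq_getElem hlt]; rfl
      rw [List.drop_eq_getElem_cons hlt, List.takeWhile_cons_of_neg (by simp only [pvSp, Bool.not_eq_true]; rw [← hget]; exact hsp)]
      simp
    · have : s = items.length := by omega
      subst this
      simp

theorem endLoop_eq (items : List (String × Int)) (start stop : Nat)
    (hstop : stop ≤ items.length) :
    pvAEnd items start stop
      = stop - (((items.take stop).drop start).reverse.takeWhile pvSp).length := by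
  revert hstop
  induction stop using pvAEnd.induct (items := items) (start := start) with
  | case1 stop hcond ih =>
    intro hstop
    rw [pvAEnd, if_pos hcond]
    simp only [Bool.and_eq_true, decide_eq_true_eq] at hcond
    obtain ⟨hlt, hsp⟩ := hcond
    have hidx : stop - 1 < items.length := by omega
    have hget : items.getD (stop - 1) ("", 0) = items[stop - 1]'hidx := by
      rw [List.getD_eq_getElem?_getD, List.getElem?_eq_getElem hidx]; rfl
    have hseg : ((items.take stop).drop start).reverse
        = items[stop - 1]'hidx :: ((items.take (stop - 1)).drop start).reverse := by
      have h1 : items.take stop = items.take (stop - 1) ++ [items[stop - 1]'hidx] := by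
        conv_lhs => rw [show stop = (stop - 1) + 1 from by omega]
        rw [List.take_succ, List.getElem?_eq_getElem hidx]
        rfl
      rw [h1, List.drop_append_of_le_length (by simp; omega), List.reverse_append]
      simp
    rw [ih (by omega), hseg, List.takeWhile_cons_of_pos (by simp only [pvSp]; rw [← hget]; exact hsp)]
    have hle : (((items.take (stop - 1)).drop start).reverse.takeWhile pvSp).length
        ≤ stop - 1 := by
      have := (List.takeWhile_prefix (l := ((items.take (stop - 1)).drop start).reverse) pvSp).length_le
      simp at this
      omega
    simp
    omega
  | case2 stop hcond =>
    intro hstop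
    rw [pvAEnd, if_neg hcond]
    simp only [Bool.and_eq_true, decide_eq_true_eq, not_and] at hcond
    by_cases hlt : start < stop
    · have hsp := hcond hlt
      simp only [Bool.not_eq_true] at hsp
      have hidx : stop - 1 < items.length := by omega
      have hget : items.getD (stop - 1) ("", 0) = items[stop - 1]'hidx := by
        rw [List.getD_eq_getElem?_getD, List.getElem?_eq_getElem hidx]; rfl
      have hseg : ((items.take stop).drop start).reverse
          = items[stop - 1]'hidx :: ((items.take (stop - 1)).drop start).reverse := by
        have h1 : items.take stop = items.take (stop - 1) ++ [items[stop - 1]'hidx] := by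
          conv_lhs => rw [show stop = (stop - 1) + 1 from by omega]
          rw [List.take_succ, List.getElem?_eq_getElem hidx]
          rfl
        rw [h1, List.drop_append_of_le_length (by simp; omega), List.reverse_append]
        simp
      rw [hseg, List.takeWhile_cons_of_neg (by simp only [pvSp, Bool.not_eq_true]; rw [← hget]; exact hsp)]
      simp
    · have hnil : (items.take stop).drop start = [] := by
        apply List.drop_eq_nil_of_le
        simp
        omega
      rw [hnil]
      simp

theorem takeWhile_length_lt {α : Type} (p : α → Bool) (l : List α)
    (h : ∃ a ∈ l, p a = false) : (l.takeWhile p).length < l.length := by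
  obtain ⟨a, ha, hpa⟩ := h
  have hle := (List.takeWhile_prefix (l := l) p).length_le
  rcases Nat.lt_or_ge (l.takeWhile p).length l.length with hlt | hge
  · exact hlt
  · have heq : l.takeWhile p = l := (List.takeWhile_prefix p).eq_of_length (by omega)
    have := (List.takeWhile_eq_self_iff).mp heq a ha
    rw [hpa] at this; cases this

-- ===== VERDICT (by name: the statement is the Claim_ definition above) =====
theorem trim_edges_py_spec : Claim_equal_trim_edges_py := by
  intro items _
  unfold Spec_trim_edges_py trim_edges_py trim_edges_py_alt
  have hkdef : ((PySem.List.enumerate items 0).filter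
      (fun p => !PySem.Str.strIsspace p.2.1)).map (·.1) = pvKeep items 0 := rfl
  have hstart : pvAStart items 0 items.length
      = (items.takeWhile pvSp).length := by
    simpa using startLoop_eq items 0 (by omega)
  have hstop : pvAEnd items (items.takeWhile pvSp).length items.length
      = items.length - ((items.drop (items.takeWhile pvSp).length).reverse.takeWhile pvSp).length := by
    have := endLoop_eq items (items.takeWhile pvSp).length items.length (le_refl _)
    simpa using this
  rcases hk : pvKeep items 0 with _ | ⟨i, rest⟩
  · -- all units are whitespace: both sides give ("", [])
    have hall : ∀ x ∈ items, pvSp x = true := (keep_nil_iff items 0).mp hk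
    have hm : (items.takeWhile pvSp).length = items.length := by
      rw [List.takeWhile_eq_self_iff.mpr hall]
    simp only [hkdef, hk]
    rw [hstart, hstop, hm]
    simp [PySem.List.slice_natCast, PySem.Str.join]
  · have hne : ∃ x ∈ items, pvSp x = false := by
      by_contra hno
      push_neg at hno
      have : pvKeep items 0 = [] := (keep_nil_iff items 0).mpr (by
        intro x hx
        cases h : pvSp x
        · exact absurd h (hno x hx)
        · rfl)
      rw [hk] at this; cases this
    have hi : i = ((items.takeWhile pvSp).length : Int) := by
      simpa using keep_head items 0 i rest hk
    have hlast : (pvKeep items 0).getLastD 0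
        = ((items.length - 1 - (items.reverse.takeWhile pvSp).length : Nat) : Int) := by
      simpa using keep_last items 0 0 hne
    -- the whitespace suffix of items equals that of items.drop m
    have hmlt : (items.takeWhile pvSp).length < items.length := takeWhile_length_lt pvSp items hne
    have hdropne : ∃ a ∈ (items.drop (items.takeWhile pvSp).length).reverse, pvSp a = false := by
      have hdw : items.dropWhile pvSp = items.drop (items.takeWhile pvSp).length := by
        conv_rhs => rw [← List.takeWhile_append_dropWhile (p := pvSp) (l := items)]
        rw [List.drop_append_of_le_length (by simp)]
        simp
      rcases hhd : items.dropWhile pvSp with _ | ⟨y, ys⟩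
      · rw [hhd] at hdw
        have : items.length ≤ (items.takeWhile pvSp).length := by
          have := congrArg List.length hdw
          simp at this
          omega
        omega
      · refine ⟨y, ?_, ?_⟩
        · rw [← hdw, hhd]; simp
        · have := List.head?_dropWhile_not pvSp items
          rw [hhd] at this
          simp at this
          simpa using this
    have hrr : (items.reverse.takeWhile pvSp).length
        = ((items.drop (items.takeWhile pvSp).length).reverse.takeWhile pvSp).length := by
      conv_lhs => rw [← List.take_append_drop (items.takeWhile pvSp).length items]
      rw [List.reverse_append, takeWhile_append_left pvSp _ _ hdropne]
    have hrlt : (items.reverse.takeWhile pvSp).length < items.length := by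
      have := takeWhile_length_lt pvSp items.reverse (by
        obtain ⟨a, ha, hpa⟩ := hne
        exact ⟨a, by simpa using ha, hpa⟩)
      simpa using this
    simp only [hkdef, hk]
    rw [hstart, hstop]
    rw [← hk, hlast, hi]
    have hb : ((items.length - 1 - (items.reverse.takeWhile pvSp).length : Nat) : Int) + 1
        = ((items.length - ((items.drop (items.takeWhile pvSp).length).reverse.takeWhile pvSp).length : Nat) : Int) := by
      rw [← hrr]
      push_cast [Nat.cast_sub (by omega : (items.reverse.takeWhile pvSp).length ≤ items.length - 1)]
      omega
    rw [hb]
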